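-- pv_equiv track=rewrite | github.com/Sin-Yejun/Coding-Study | Leetcode/1863. Sum of All Subset XOR Totals.py | subsetXORSum
-- ===== SOURCE A (Python) =====
-- from typing import List
--
-- from itertools import combinations
--
-- def subsetXORSum(nums: List[int]) -> int:
--     output = 0
--     for i in range(1, len(nums)+1):
--         temp = list(combinations(nums, i))
--         for j in temp:
--             xor = 0
--             for k in j:
--                 xor ^= k
--             output += xor
--     return output
-- ===== SOURCE B (Python) =====
-- from typing import List
--
--
-- def subsetXORSum(nums: List[int]) -> int:
--     # Closed form: each bit set in the OR of nums is set in exactly half of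
--     # all 2**n subset XORs, so the total is (OR of nums) * 2**(n-1).
--     if not nums:
--         return 0
--     acc = 0
--     for x in nums:
--         acc |= x
--     return acc * 2 ** (len(nums) - 1)
-- ===== Notes on version B (the rewrite author's own statement) =====
-- stated objective: faster
-- what changed: Replaced the enumeration of all subsets via itertools.combinations with the closed form (bitwise OR of all elements) * 2^(n-1).
import Mathlib
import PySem

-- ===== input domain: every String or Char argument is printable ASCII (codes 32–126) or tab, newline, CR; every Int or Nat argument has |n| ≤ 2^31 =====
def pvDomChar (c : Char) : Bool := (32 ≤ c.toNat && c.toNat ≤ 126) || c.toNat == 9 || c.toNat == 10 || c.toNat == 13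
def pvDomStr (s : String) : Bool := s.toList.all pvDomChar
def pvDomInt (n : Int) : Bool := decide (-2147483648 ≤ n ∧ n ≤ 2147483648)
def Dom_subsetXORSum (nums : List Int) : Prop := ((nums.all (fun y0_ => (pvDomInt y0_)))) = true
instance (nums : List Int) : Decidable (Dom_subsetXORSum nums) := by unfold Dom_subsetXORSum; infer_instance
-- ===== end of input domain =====

-- B replaces A's enumeration of all subsets with the closed form (OR of all elements) * 2^(n-1); objective: faster.

-- ===== PORT A =====
-- hand port of itertools.combinations(nums, k) (exact: yields the same tuples in the same
-- lexicographic-by-index order: first the combinations containing the head, then the rest)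
def pvCombos : List Int → Nat → List (List Int)
  | _, 0 => [[]]
  | [], _ + 1 => []
  | x :: xs, k + 1 => (pvCombos xs k).map (x :: ·) ++ pvCombos xs (k + 1)

def subsetXORSum (nums : List Int) : Int :=
  (PySem.List.pyRange 1 ((nums.length : Int) + 1) 1).foldl (fun output i =>
    let temp := pvCombos nums i.toNat
    temp.foldl (fun output j =>
      output + j.foldl (fun xor k => PySem.Int.bxor xor k) 0) output) 0

-- ===== PORT B =====
def subsetXORSum_alt (nums : List Int) : Int :=
  if nums.isEmpty then 0
  else (nums.foldl (fun acc x => PySem.Int.bor acc x) 0) * 2 ^ (nums.length - 1)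

-- ===== PRECONDITION & SPEC =====
def Spec_subsetXORSum (nums : List Int) (out : Int) : Prop := out = subsetXORSum_alt nums
instance (nums : List Int) (out : Int) : Decidable (Spec_subsetXORSum nums out) := by unfold Spec_subsetXORSum; infer_instance

-- ===== CLAIM (what is proved, stated in full; the proofs are below) =====
def Claim_equal_subsetXORSum : Prop := ∀ (nums : List Int), Dom_subsetXORSum nums → Spec_subsetXORSum nums (subsetXORSum nums)

-- ===== LEMMAS AND PROOFS =====

-- PySem's Python-exact bitwise ops agree with Mathlib's Int.xor / Int.lor.
lemma pv_ldiff_sub (n : Nat) : ∀ m : Nat, Nat.ldiff n m = n - (n &&& m) := by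
  induction n using Nat.binaryRec with
  | zero => intro m; simp [Nat.ldiff]
  | bit b n ih =>
    intro m
    rw [← Nat.bit_bodd_div2 m, Nat.ldiff_bit, Nat.land_bit, ih]
    have h : n &&& m.div2 ≤ n := Nat.and_le_left
    cases b <;> cases m.bodd <;> simp [Nat.bit_val] <;> omega

lemma pv_bxor_eq (a b : Int) : PySem.Int.bxor a b = Int.xor a b := by
  cases a with
  | ofNat m => cases b with
    | ofNat n => simp [PySem.Int.bxor, Int.xor]
    | negSucc n => simp [PySem.Int.bxor, Int.xor, Int.negSucc_eq]; omega
  | negSucc m => cases b with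
    | ofNat n => simp [PySem.Int.bxor, Int.xor, Int.negSucc_eq]; omega
    | negSucc n => simp [PySem.Int.bxor, Int.xor, Int.negSucc_eq]; omega

lemma pv_bor_eq (a b : Int) : PySem.Int.bor a b = Int.lor a b := by
  cases a with
  | ofNat m => cases b with
    | ofNat n => simp [PySem.Int.bor, Int.lor]
    | negSucc n => simp [PySem.Int.bor, Int.lor, Int.negSucc_eq, pv_ldiff_sub]; omega
  | negSucc m => cases b with
    | ofNat n => simp [PySem.Int.bor, Int.lor, Int.negSucc_eq, pv_ldiff_sub]; omega
    | negSucc n => simp [PySem.Int.bor, Int.lor, Int.negSucc_eq]; omega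

lemma pv_div2_natAbs_le (n : Int) : n.div2.natAbs ≤ n.natAbs := by
  cases n with
  | ofNat m => simp [Int.div2, Nat.div2_val]; omega
  | negSucc m => simp [Int.div2, Nat.div2_val]; omega

lemma pv_div2_natAbs_lt (n : Int) (h0 : n ≠ 0) (h1 : n ≠ -1) : n.div2.natAbs < n.natAbs := by
  cases n with
  | ofNat m =>
    have : m ≠ 0 := by rintro rfl; exact h0 rfl
    simp [Int.div2, Nat.div2_val]; omega
  | negSucc m =>
    have : m ≠ 0 := by rintro rfl; exact h1 rfl
    simp [Int.div2, Nat.div2_val]; omega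

-- The per-step arithmetic–bitwise identity behind the closed form (proved by binary induction).
lemma pv_key3 : ∀ c x m : Int,
    (c + Int.xor c m) + (Int.xor c x + Int.xor (Int.xor c x) m)
      = 2 * (c + Int.xor c (Int.lor x m)) := by
  suffices H : ∀ N, ∀ c x m : Int, c.natAbs + x.natAbs + m.natAbs ≤ N →
      (c + Int.xor c m) + (Int.xor c x + Int.xor (Int.xor c x) m)
        = 2 * (c + Int.xor c (Int.lor x m)) by
    intro c x m; exact H _ c x m le_rfl
  intro N
  induction N using Nat.strong_induction_on with
  | _ N ih =>
    intro c x m hle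
    by_cases hbase : (c = 0 ∨ c = -1) ∧ (x = 0 ∨ x = -1) ∧ (m = 0 ∨ m = -1)
    · obtain ⟨hc, hx, hm⟩ := hbase
      rcases hc with rfl | rfl <;> rcases hx with rfl | rfl <;> rcases hm with rfl | rfl <;>
        simp only [← pv_bxor_eq, ← pv_bor_eq] <;> decide
    · have hlt : c.div2.natAbs + x.div2.natAbs + m.div2.natAbs < N := by
        have lc := pv_div2_natAbs_le c
        have lx := pv_div2_natAbs_le x
        have lm := pv_div2_natAbs_le m
        have key : ¬(c = 0 ∨ c = -1) ∨ ¬(x = 0 ∨ x = -1) ∨ ¬(m = 0 ∨ m = -1) := by tauto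
        rcases key with h | h | h
        · have := pv_div2_natAbs_lt c (fun h0 => h (Or.inl h0)) (fun h1 => h (Or.inr h1))
          omega
        · have := pv_div2_natAbs_lt x (fun h0 => h (Or.inl h0)) (fun h1 => h (Or.inr h1))
          omega
        · have := pv_div2_natAbs_lt m (fun h0 => h (Or.inl h0)) (fun h1 => h (Or.inr h1))
          omega
      have IH := ih _ hlt c.div2 x.div2 m.div2 le_rfl
      rw [← Int.bit_decomp c, ← Int.bit_decomp x, ← Int.bit_decomp m]
      simp only [Int.lxor_bit, Int.lor_bit]
      simp only [Int.bit_val]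
      revert IH
      generalize Int.xor c.div2 m.div2 = A
      generalize Int.xor c.div2 x.div2 = B
      generalize Int.xor B m.div2 = C
      generalize Int.xor c.div2 (Int.lor x.div2 m.div2) = D
      intro IH
      cases hc : c.bodd <;> cases hx : x.bodd <;> cases hm : m.bodd <;> simp <;> omega

lemma pv_lor_assoc : ∀ a b c : Int, Int.lor (Int.lor a b) c = Int.lor a (Int.lor b c) := by
  suffices H : ∀ N, ∀ a b c : Int, a.natAbs + b.natAbs + c.natAbs ≤ N →
      Int.lor (Int.lor a b) c = Int.lor a (Int.lor b c) by
    intro a b c; exact H _ a b c le_rfl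
  intro N
  induction N using Nat.strong_induction_on with
  | _ N ih =>
    intro a b c hle
    by_cases hbase : (a = 0 ∨ a = -1) ∧ (b = 0 ∨ b = -1) ∧ (c = 0 ∨ c = -1)
    · obtain ⟨ha, hb, hc⟩ := hbase
      rcases ha with rfl | rfl <;> rcases hb with rfl | rfl <;> rcases hc with rfl | rfl <;>
        simp only [← pv_bor_eq] <;> decide
    · have hlt : a.div2.natAbs + b.div2.natAbs + c.div2.natAbs < N := by
        have la := pv_div2_natAbs_le a
        have lb := pv_div2_natAbs_le b
        have lc := pv_div2_natAbs_le c
        have key : ¬(a = 0 ∨ a = -1) ∨ ¬(b = 0 ∨ b = -1) ∨ ¬(c = 0 ∨ c = -1) := by tauto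
        rcases key with h | h | h
        · have := pv_div2_natAbs_lt a (fun h0 => h (Or.inl h0)) (fun h1 => h (Or.inr h1))
          omega
        · have := pv_div2_natAbs_lt b (fun h0 => h (Or.inl h0)) (fun h1 => h (Or.inr h1))
          omega
        · have := pv_div2_natAbs_lt c (fun h0 => h (Or.inl h0)) (fun h1 => h (Or.inr h1))
          omega
      have IH := ih _ hlt a.div2 b.div2 c.div2 le_rfl
      rw [← Int.bit_decomp a, ← Int.bit_decomp b, ← Int.bit_decomp c]
      simp only [Int.lor_bit]
      rw [IH, Bool.or_assoc]

lemma pv_key3' (c x m : Int) :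
    (c + PySem.Int.bxor c m) + (PySem.Int.bxor c x + PySem.Int.bxor (PySem.Int.bxor c x) m)
      = 2 * (c + PySem.Int.bxor c (PySem.Int.bor x m)) := by
  simp only [pv_bxor_eq, pv_bor_eq]
  exact pv_key3 c x m

-- pvG c l = sum over ALL sublists S of l of (c XOR (xor of S))
def pvG (c : Int) : List Int → Int
  | [] => c
  | x :: xs => pvG c xs + pvG (PySem.Int.bxor c x) xs

def pvOr : List Int → Int
  | [] => 0
  | x :: xs => PySem.Int.bor x (pvOr xs)

lemma pv_gmain (l : List Int) : ∀ c : Int,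
    2 * pvG c l = 2 ^ l.length * (c + PySem.Int.bxor c (pvOr l)) := by
  induction l with
  | nil => intro c; simp [pvG, pvOr, PySem.Int.bxor_zero]; ring
  | cons x xs ih =>
    intro c
    have h1 := ih c
    have h2 := ih (PySem.Int.bxor c x)
    have h3 := pv_key3' c x (pvOr xs)
    simp only [pvG, pvOr, List.length_cons, pow_succ]
    linear_combination h1 + h2 + (2 ^ xs.length : Int) * h3

-- the inner sum of A for one size i, started at accumulator c
def pvFc (c : Int) (l : List Int) (i : Nat) : Int :=
  ((pvCombos l i).map (fun j => j.foldl (fun a k => PySem.Int.bxor a k) c)).sum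

lemma pv_combos_big (l : List Int) : ∀ k : Nat, l.length < k → pvCombos l k = [] := by
  induction l with
  | nil => intro k hk; cases k with | zero => omega | succ k => rfl
  | cons x xs ih =>
    intro k hk
    cases k with
    | zero => omega
    | succ k =>
      simp only [pvCombos]
      rw [ih k (by simp at hk; omega), ih (k + 1) (by simp at hk; omega)]
      simp

lemma pv_Fc_zero (c : Int) (l : List Int) : pvFc c l 0 = c := by
  simp [pvFc, pvCombos]

lemma pv_Fc_step (c : Int) (x : Int) (xs : List Int) (k : Nat) :
    pvFc c (x :: xs) (k + 1) = pvFc (PySem.Int.bxor c x) xs k + pvFc c xs (k + 1) := by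
  simp [pvFc, pvCombos, Function.comp_def]

lemma pv_sum_peel (f : Nat → Int) (n : Nat) :
    ((List.range (n + 1)).map f).sum = f 0 + ((List.range n).map (fun k => f (k + 1))).sum := by
  rw [List.range_succ_eq_map]
  simp [List.map_map, Function.comp_def, Nat.succ_eq_add_one]

lemma pv_total (l : List Int) : ∀ c : Int,
    ((List.range (l.length + 1)).map (fun i => pvFc c l i)).sum = pvG c l := by
  induction l with
  | nil => intro c; simp [pvG, pv_Fc_zero]
  | cons x xs ih =>
    intro c
    rw [show (x :: xs).length + 1 = xs.length + 1 + 1 from by simp]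
    rw [pv_sum_peel (fun i => pvFc c (x :: xs) i) (xs.length + 1)]
    have hstep : ((List.range (xs.length + 1)).map (fun k => pvFc c (x :: xs) (k + 1))).sum
        = ((List.range (xs.length + 1)).map
            (fun k => pvFc (PySem.Int.bxor c x) xs k + pvFc c xs (k + 1))).sum := by
      congr 1
      exact List.map_congr_left (fun k _ => pv_Fc_step c x xs k)
    rw [hstep, PySem.List.sum_map_add_int, ih (PySem.Int.bxor c x)]
    have htail : pvFc c (x :: xs) 0 + ((List.range (xs.length + 1)).map (fun k => pvFc c xs (k + 1))).sum
        = pvG c xs := by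
      have hbig : ((List.range (xs.length + 1 + 1)).map (fun i => pvFc c xs i)).sum = pvG c xs := by
        rw [List.range_succ]
        simp only [List.map_append, List.sum_append, List.map_cons, List.sum_cons,
          List.map_nil, List.sum_nil]
        rw [show pvFc c xs (xs.length + 1) = 0 from by
          simp [pvFc, pv_combos_big xs (xs.length + 1) (by omega)]]
        rw [ih c]
        simp
      rw [pv_sum_peel (fun i => pvFc c xs i) (xs.length + 1)] at hbig
      simp only [pv_Fc_zero] at *
      omega
    simp only [pvG]
    omega

lemma pv_A_eq_g (nums : List Int) : subsetXORSum nums = pvG 0 nums := by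
  unfold subsetXORSum
  simp only [PySem.List.foldl_add]
  rw [PySem.List.pyRange_one]
  have hN : (((nums.length : Int) + 1) - 1).toNat = nums.length := by omega
  rw [hN, List.map_map]
  have hsum : ((List.range nums.length).map (fun k => pvFc 0 nums (k + 1))).sum
      = pvG 0 nums := by
    have htot := pv_total nums 0
    rw [pv_sum_peel (fun i => pvFc 0 nums i) nums.length, pv_Fc_zero] at htot
    omega
  rw [← hsum, zero_add]
  congr 1
  apply List.map_congr_left
  intro k _
  have hk : ((1 : Int) + (k : Int)).toNat = k + 1 := by omega
  simp [pvFc, hk]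

lemma pv_foldl_or (l : List Int) : ∀ a : Int,
    l.foldl (fun acc x => PySem.Int.bor acc x) a = PySem.Int.bor a (pvOr l) := by
  induction l with
  | nil => intro a; simp [pvOr, PySem.Int.bor_zero]
  | cons x xs ih =>
    intro a
    simp only [List.foldl_cons, pvOr]
    rw [ih (PySem.Int.bor a x)]
    simp only [pv_bor_eq]
    exact pv_lor_assoc a x (pvOr xs)

theorem pv_final (nums : List Int) : subsetXORSum nums = subsetXORSum_alt nums := by
  cases nums with
  | nil => decide
  | cons y ys =>
    unfold subsetXORSum_alt
    simp only [List.isEmpty_cons, Bool.false_eq_true, if_false]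
    rw [pv_A_eq_g]
    have hg := pv_gmain (y :: ys) 0
    have hx0 : PySem.Int.bxor 0 (pvOr (y :: ys)) = pvOr (y :: ys) := by
      rw [PySem.Int.bxor_comm, PySem.Int.bxor_zero]
    rw [hx0] at hg
    have hfold : (y :: ys).foldl (fun acc x => PySem.Int.bor acc x) 0 = pvOr (y :: ys) := by
      rw [pv_foldl_or, PySem.Int.bor_comm, PySem.Int.bor_zero]
    rw [hfold]
    have hlen : (y :: ys).length = ((y :: ys).length - 1) + 1 := by simp
    have hpow : (2 : Int) ^ (y :: ys).length = 2 * 2 ^ ((y :: ys).length - 1) := by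
      calc (2 : Int) ^ (y :: ys).length = 2 ^ (((y :: ys).length - 1) + 1) := by rw [← hlen]
        _ = 2 ^ ((y :: ys).length - 1) * 2 := pow_succ 2 _
        _ = 2 * 2 ^ ((y :: ys).length - 1) := by ring
    rw [hpow] at hg
    have : pvG 0 (y :: ys) = 2 ^ ((y :: ys).length - 1) * (0 + pvOr (y :: ys)) := by
      apply mul_left_cancel₀ (two_ne_zero)
      rw [hg]; ring
    rw [this]; ring

-- ===== VERDICT (by name: the statement is the Claim_ definition above) =====
theorem subsetXORSum_spec : Claim_equal_subsetXORSum := by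
  intro nums _
  exact pv_final nums
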